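-- pv_equiv track=rewrite | github.com/djordjeivanovic11/rover | perception/slam_launch/slam_launch/sensor_fusion.py | are_classes_compatible
-- ===== SOURCE A (Python) =====
-- def are_classes_compatible(class1: str, class2: str) -> bool:
--     """Check if two classes can be fused"""
--     # ArUco markers can be associated with any object class
--     if class1.startswith('aruco_') or class2.startswith('aruco_'):
--         return True
--
--     # Same class names are compatible
--     if class1 == class2:
--         return True
--
--     # Define compatible class groups
--     compatible_groups = [
--         {'bottle', 'container'},
--         {'rock', 'mineral_sample', 'boulder'},
--         {'person', 'astronaut', 'scientist'},
--         {'toolbox', 'equipment_cache'},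
--     ]
--
--     for group in compatible_groups:
--         if class1 in group and class2 in group:
--             return True
--
--     return False
-- ===== SOURCE B (Python) =====
-- # Canonicalization: every non-representative group member maps to its group's
-- # representative; all other names (including representatives) canonicalize to
-- # themselves. Two names are fusable iff their canonical forms coincide, which
-- # also subsumes the class1 == class2 case.
-- _CANON = {
--     'container': 'bottle',
--     'mineral_sample': 'rock', 'boulder': 'rock',
--     'astronaut': 'person', 'scientist': 'person',
--     'equipment_cache': 'toolbox',
-- }
--
--
-- def are_classes_compatible(class1: str, class2: str) -> bool:
--     """Check if two classes can be fused"""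
--     if class1.startswith('aruco_') or class2.startswith('aruco_'):
--         return True
--     return _CANON.get(class1, class1) == _CANON.get(class2, class2)
-- ===== Notes on version B (the rewrite author's own statement) =====
-- stated objective: alternative
-- what changed: Replaced the per-call group list, the explicit class1==class2 guard and the loop scanning each group for both names with a normalize-then-compare scheme: each name is mapped to a canonical group representative (itself if unlisted) via a module-level dict, and compatibility is equality of the two canonical forms, which subsumes the same-name case.
import Mathlib
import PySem

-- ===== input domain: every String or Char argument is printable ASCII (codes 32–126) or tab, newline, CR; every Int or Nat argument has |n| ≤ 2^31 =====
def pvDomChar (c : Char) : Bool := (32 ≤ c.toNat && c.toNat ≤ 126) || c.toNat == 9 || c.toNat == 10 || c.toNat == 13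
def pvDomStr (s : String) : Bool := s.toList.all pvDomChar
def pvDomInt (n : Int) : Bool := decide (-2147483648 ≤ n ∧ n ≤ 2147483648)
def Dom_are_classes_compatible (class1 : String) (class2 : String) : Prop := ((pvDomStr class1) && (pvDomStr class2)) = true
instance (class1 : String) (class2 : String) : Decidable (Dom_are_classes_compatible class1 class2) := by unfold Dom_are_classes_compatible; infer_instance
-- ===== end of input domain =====

-- B drops the equality guard and the group-membership loop: it canonicalizes each
-- name to a group representative (itself if unlisted) and compares canonical forms (alternative).

-- ===== PORT A =====
-- the literal list of set literals A builds on each call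
def pvCompatibleGroups : List (PySem.Set String) :=
  [ PySem.Set.ofList ["bottle", "container"],
    PySem.Set.ofList ["rock", "mineral_sample", "boulder"],
    PySem.Set.ofList ["person", "astronaut", "scientist"],
    PySem.Set.ofList ["toolbox", "equipment_cache"] ]

-- 'for group in compatible_groups: if class1 in group and class2 in group: return True' then 'return False'
def pvLoopA (groups : List (PySem.Set String)) (class1 class2 : String) : Bool :=
  match groups with
  | [] => false
  | g :: rest =>
      if PySem.Set.contains g class1 && PySem.Set.contains g class2 then true
      else pvLoopA rest class1 class2

def are_classes_compatible (class1 : String) (class2 : String) : Bool :=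
  if PySem.Str.startswith class1 "aruco_" || PySem.Str.startswith class2 "aruco_" then true
  else if class1 == class2 then true
  else pvLoopA pvCompatibleGroups class1 class2

-- ===== PORT B =====
-- module-level dict _CANON (insertion order of the Python literal)
def pvCanon : PySem.Dict String String :=
  PySem.Dict.ofList
    [ ("container", "bottle"),
      ("mineral_sample", "rock"), ("boulder", "rock"),
      ("astronaut", "person"), ("scientist", "person"),
      ("equipment_cache", "toolbox") ]

def are_classes_compatible_alt (class1 : String) (class2 : String) : Bool :=
  if PySem.Str.startswith class1 "aruco_" || PySem.Str.startswith class2 "aruco_" then true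
  else
    -- return _CANON.get(class1, class1) == _CANON.get(class2, class2)
    PySem.Dict.getD pvCanon class1 class1 == PySem.Dict.getD pvCanon class2 class2

-- ===== PRECONDITION & SPEC =====
def Spec_are_classes_compatible (class1 : String) (class2 : String) (out : Bool) : Prop := out = are_classes_compatible_alt class1 class2
instance (class1 : String) (class2 : String) (out : Bool) : Decidable (Spec_are_classes_compatible class1 class2 out) := by unfold Spec_are_classes_compatible; infer_instance

-- ===== CLAIM (what is proved, stated in full; the proofs are below) =====
def Claim_equal_are_classes_compatible : Prop := ∀ (class1 : String) (class2 : String), Dom_are_classes_compatible class1 class2 → Spec_are_classes_compatible class1 class2 (are_classes_compatible class1 class2)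

-- ===== LEMMAS AND PROOFS =====

-- B's lookup with default reduces to this if-chain (proof-only helper)
def chainCanon (s : String) : String :=
  if s = "equipment_cache" then "toolbox"
  else if s = "scientist" then "person" else if s = "astronaut" then "person"
  else if s = "boulder" then "rock" else if s = "mineral_sample" then "rock"
  else if s = "container" then "bottle" else s

-- the literal groups after Set.ofList evaluation (proof-only helper)
def pvGroupsLit : List (PySem.Set String) := [["bottle","container"],["rock","mineral_sample","boulder"],
    ["person","astronaut","scientist"],["toolbox","equipment_cache"]]

theorem pvGetD_eq_chain (s : String) : PySem.Dict.getD pvCanon s s = chainCanon s := by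
  have h : pvCanon =
    (((((PySem.Dict.empty.insert "container" "bottle").insert "mineral_sample" "rock").insert
      "boulder" "rock").insert "astronaut" "person").insert "scientist" "person").insert
      "equipment_cache" "toolbox" := by decide
  rw [h]
  simp [PySem.Dict.getD_insert, PySem.Dict.getD_empty, chainCanon]

theorem pvBeqSwap (a b : String) : (a == b) = decide (b = a) := by
  by_cases h : a = b
  · subst h; simp
  · simp [h, Ne.symm h]

theorem pvCase1 (c2 : String) :
    (if ("equipment_cache" : String) == c2 then true else pvLoopA pvGroupsLit "equipment_cache" c2) = (("toolbox" : String) == chainCanon c2) := by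
  simp [pvGroupsLit, pvLoopA, PySem.Set.contains, chainCanon]; split_ifs <;> (try simp_all [eq_comm]) <;> exact pvBeqSwap _ _

theorem pvCase2 (c2 : String) :
    (if ("toolbox" : String) == c2 then true else pvLoopA pvGroupsLit "toolbox" c2) = (("toolbox" : String) == chainCanon c2) := by
  simp [pvGroupsLit, pvLoopA, PySem.Set.contains, chainCanon]; split_ifs <;> (try simp_all [eq_comm]) <;> exact pvBeqSwap _ _

theorem pvCase3 (c2 : String) :
    (if ("scientist" : String) == c2 then true else pvLoopA pvGroupsLit "scientist" c2) = (("person" : String) == chainCanon c2) := by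
  simp [pvGroupsLit, pvLoopA, PySem.Set.contains, chainCanon]; split_ifs <;> (try simp_all [eq_comm]) <;> exact pvBeqSwap _ _

theorem pvCase4 (c2 : String) :
    (if ("astronaut" : String) == c2 then true else pvLoopA pvGroupsLit "astronaut" c2) = (("person" : String) == chainCanon c2) := by
  simp [pvGroupsLit, pvLoopA, PySem.Set.contains, chainCanon]; split_ifs <;> (try simp_all [eq_comm]) <;> exact pvBeqSwap _ _

theorem pvCase5 (c2 : String) :
    (if ("person" : String) == c2 then true else pvLoopA pvGroupsLit "person" c2) = (("person" : String) == chainCanon c2) := by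
  simp [pvGroupsLit, pvLoopA, PySem.Set.contains, chainCanon]; split_ifs <;> (try simp_all [eq_comm]) <;> exact pvBeqSwap _ _

theorem pvCase6 (c2 : String) :
    (if ("boulder" : String) == c2 then true else pvLoopA pvGroupsLit "boulder" c2) = (("rock" : String) == chainCanon c2) := by
  simp [pvGroupsLit, pvLoopA, PySem.Set.contains, chainCanon]; split_ifs <;> (try simp_all [eq_comm]) <;> exact pvBeqSwap _ _

theorem pvCase7 (c2 : String) :
    (if ("mineral_sample" : String) == c2 then true else pvLoopA pvGroupsLit "mineral_sample" c2) = (("rock" : String) == chainCanon c2) := by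
  simp [pvGroupsLit, pvLoopA, PySem.Set.contains, chainCanon]; split_ifs <;> (try simp_all [eq_comm]) <;> exact pvBeqSwap _ _

theorem pvCase8 (c2 : String) :
    (if ("rock" : String) == c2 then true else pvLoopA pvGroupsLit "rock" c2) = (("rock" : String) == chainCanon c2) := by
  simp [pvGroupsLit, pvLoopA, PySem.Set.contains, chainCanon]; split_ifs <;> (try simp_all [eq_comm]) <;> exact pvBeqSwap _ _

theorem pvCase9 (c2 : String) :
    (if ("container" : String) == c2 then true else pvLoopA pvGroupsLit "container" c2) = (("bottle" : String) == chainCanon c2) := by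
  simp [pvGroupsLit, pvLoopA, PySem.Set.contains, chainCanon]; split_ifs <;> (try simp_all [eq_comm]) <;> exact pvBeqSwap _ _

theorem pvCase10 (c2 : String) :
    (if ("bottle" : String) == c2 then true else pvLoopA pvGroupsLit "bottle" c2) = (("bottle" : String) == chainCanon c2) := by
  simp [pvGroupsLit, pvLoopA, PySem.Set.contains, chainCanon]; split_ifs <;> (try simp_all [eq_comm]) <;> exact pvBeqSwap _ _

theorem pvCaseNone (c1 c2 : String) (h1 : ¬ c1 = "equipment_cache") (h2 : ¬ c1 = "toolbox") (h3 : ¬ c1 = "scientist") (h4 : ¬ c1 = "astronaut") (h5 : ¬ c1 = "person") (h6 : ¬ c1 = "boulder") (h7 : ¬ c1 = "mineral_sample") (h8 : ¬ c1 = "rock") (h9 : ¬ c1 = "container") (h10 : ¬ c1 = "bottle") :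
    (if c1 == c2 then true else pvLoopA pvGroupsLit c1 c2) = (c1 == chainCanon c2) := by
  have hl : pvLoopA pvGroupsLit c1 c2 = false := by
    simp [pvGroupsLit, pvLoopA, PySem.Set.contains, h1, h2, h3, h4, h5, h6, h7, h8, h9, h10]
  rw [hl]
  simp only [chainCanon]
  split_ifs <;> simp_all

theorem pvMain (c1 c2 : String) :
    (if c1 == c2 then true else pvLoopA pvCompatibleGroups c1 c2) = (chainCanon c1 == chainCanon c2) := by
  rw [show pvCompatibleGroups = pvGroupsLit from by decide]
  by_cases h1 : c1 = "equipment_cache"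
  · subst h1; rw [pvCase1]; simp [chainCanon]
  by_cases h2 : c1 = "toolbox"
  · subst h2; rw [pvCase2]; simp [chainCanon]
  by_cases h3 : c1 = "scientist"
  · subst h3; rw [pvCase3]; simp [chainCanon]
  by_cases h4 : c1 = "astronaut"
  · subst h4; rw [pvCase4]; simp [chainCanon]
  by_cases h5 : c1 = "person"
  · subst h5; rw [pvCase5]; simp [chainCanon]
  by_cases h6 : c1 = "boulder"
  · subst h6; rw [pvCase6]; simp [chainCanon]
  by_cases h7 : c1 = "mineral_sample"
  · subst h7; rw [pvCase7]; simp [chainCanon]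
  by_cases h8 : c1 = "rock"
  · subst h8; rw [pvCase8]; simp [chainCanon]
  by_cases h9 : c1 = "container"
  · subst h9; rw [pvCase9]; simp [chainCanon]
  by_cases h10 : c1 = "bottle"
  · subst h10; rw [pvCase10]; simp [chainCanon]
  · rw [pvCaseNone c1 c2 h1 h2 h3 h4 h5 h6 h7 h8 h9 h10]
    have : chainCanon c1 = c1 := by
      simp [chainCanon, h1, h3, h4, h6, h7, h9]
    rw [this]

-- ===== VERDICT (by name: the statement is the Claim_ definition above) =====
theorem are_classes_compatible_spec : Claim_equal_are_classes_compatible := by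
  intro class1 class2 _
  unfold Spec_are_classes_compatible are_classes_compatible are_classes_compatible_alt
  rw [pvGetD_eq_chain class1, pvGetD_eq_chain class2]
  by_cases h : (PySem.Str.startswith class1 "aruco_" || PySem.Str.startswith class2 "aruco_") = true
  · rw [if_pos h, if_pos h]
  · rw [if_neg h, if_neg h]
    exact pvMain class1 class2
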